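-- pv_equiv track=rewrite | github.com/LJuans0/LaptopProgramacion1 | April23T.py | pregunta_2
-- ===== SOURCE A (Python) =====
-- def pregunta_2( n1 :  int, n2: int) ->int:
--     """
--     Halla la suma de todos los numeros desde n1 hasta n2, que cumplan al menos una de las condiciones
--     Parametros:
--         n1 (int) : es el primer numero
--         n2 (int) : es el segundo numero
--     Retorna:
--         int : es la suma
--     """
--     ccccounter=n1
--     sumador=0
--     while ccccounter<=n2:
--         if((ccccounter%7==0 and ccccounter%5==0) or (ccccounter%3==0 and ccccounter%4==0)):
--             sumador += ccccounter
--
--         ccccounter+=1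
--     return sumador
-- ===== SOURCE B (Python) =====
-- def pregunta_2(n1: int, n2: int) -> int:
--     """Closed-form: inclusion-exclusion over arithmetic series of multiples of 35, 12, 420."""
--     if n1 > n2:
--         return 0
--
--     def tri(k: int) -> int:
--         return k * (k + 1) // 2
--
--     def sum_mult(m: int) -> int:
--         return m * (tri(n2 // m) - tri((n1 - 1) // m))
--
--     return sum_mult(35) + sum_mult(12) - sum_mult(420)
-- ===== Notes on version B (the rewrite author's own statement) =====
-- stated objective: faster
-- what changed: Replaced the element-by-element while-loop scan of [n1,n2] by an O(1) inclusion-exclusion closed form using triangular-number sums of the multiples of 35, 12 and 420.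
import Mathlib
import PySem

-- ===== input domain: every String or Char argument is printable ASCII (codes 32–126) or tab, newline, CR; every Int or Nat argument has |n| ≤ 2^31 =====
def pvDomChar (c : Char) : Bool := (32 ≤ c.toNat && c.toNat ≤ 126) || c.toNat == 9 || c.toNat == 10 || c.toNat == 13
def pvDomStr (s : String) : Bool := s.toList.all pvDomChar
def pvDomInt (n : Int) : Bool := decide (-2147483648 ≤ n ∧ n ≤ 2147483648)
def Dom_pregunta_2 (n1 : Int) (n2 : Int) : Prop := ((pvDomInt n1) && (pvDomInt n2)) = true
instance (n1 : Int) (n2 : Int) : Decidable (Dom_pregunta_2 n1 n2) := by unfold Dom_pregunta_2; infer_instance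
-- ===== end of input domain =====

-- B replaces A's element-by-element scan of [n1,n2] by an O(1) inclusion-exclusion
-- closed form (triangular-number sums of the multiples of 35, 12, 420).


-- ===== PORT A =====
-- A's while-loop: fuel = number of remaining iterations.  Python '%' by the positive
-- literals 7,5,3,4 coincides with Lean's Int.emod '%', so '%' here is exact.
def pvLoopA (fuel : Nat) (c : Int) (s : Int) (n2 : Int) : Int :=
  match fuel with
  | 0 => s
  | f + 1 =>
    if c ≤ n2 then
      pvLoopA f (c + 1) (if (c % 7 = 0 ∧ c % 5 = 0) ∨ (c % 3 = 0 ∧ c % 4 = 0) then s + c else s) n2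
    else s

def pregunta_2 (n1 : Int) (n2 : Int) : Int :=
  pvLoopA (n2 - n1 + 1).toNat n1 0 n2

-- ===== PORT B =====
-- tri(k) = k*(k+1)//2; k*(k+1) is even, so Lean's Int '/' equals Python's '//' here.
def pvTri (k : Int) : Int := k * (k + 1) / 2

-- sum of the multiples of m in [n1, n2]; '//' by the positive literals 35,12,420 is
-- PySem.Int.floordiv, exact.
def pvSumMult (n1 : Int) (n2 : Int) (m : Int) : Int :=
  m * (pvTri (PySem.Int.floordiv n2 m) - pvTri (PySem.Int.floordiv (n1 - 1) m))

def pregunta_2_alt (n1 : Int) (n2 : Int) : Int :=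
  if n1 > n2 then 0
  else pvSumMult n1 n2 35 + pvSumMult n1 n2 12 - pvSumMult n1 n2 420

-- ===== PRECONDITION & SPEC =====
def Spec_pregunta_2 (n1 : Int) (n2 : Int) (out : Int) : Prop := out = pregunta_2_alt n1 n2
instance (n1 : Int) (n2 : Int) (out : Int) : Decidable (Spec_pregunta_2 n1 n2 out) := by unfold Spec_pregunta_2; infer_instance

-- ===== CLAIM (what is proved, stated in full; the proofs are below) =====
def Claim_equal_pregunta_2 : Prop := ∀ (n1 : Int) (n2 : Int), Dom_pregunta_2 n1 n2 → Spec_pregunta_2 n1 n2 (pregunta_2 n1 n2)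

-- ===== LEMMAS AND PROOFS =====
-- closed form viewed as a function of the lower bound
def pvF (c : Int) (n2 : Int) : Int :=
  pvSumMult c n2 35 + pvSumMult c n2 12 - pvSumMult c n2 420

theorem pvEdivEq (a b q : Int) (h : 0 < b) (h1 : q * b ≤ a) (h2 : a < (q + 1) * b) :
    a / b = q := by
  have u : q ≤ a / b := by rw [Int.le_ediv_iff_mul_le h]; exact h1
  have v : a / b < q + 1 := by
    by_contra hc
    rw [Int.not_lt] at hc
    have : (q + 1) * b ≤ a := by rw [← Int.le_ediv_iff_mul_le h]; omega
    omega
  omega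

theorem pvTri_step (q : Int) : pvTri q = pvTri (q - 1) + q := by
  unfold pvTri
  have h : q * (q + 1) = (q - 1) * (q - 1 + 1) + q * 2 := by ring
  rw [h, Int.add_mul_ediv_right _ _ (by norm_num : (2 : Int) ≠ 0)]

theorem pvFloordiv_pred (c m : Int) (hm : 0 < m) :
    PySem.Int.floordiv (c - 1) m =
      if c % m = 0 then PySem.Int.floordiv c m - 1 else PySem.Int.floordiv c m := by
  rw [PySem.Int.floordiv_eq_ediv_of_pos hm, PySem.Int.floordiv_eq_ediv_of_pos hm]
  have h1 : c / m * m + c % m = c := Int.ediv_mul_add_emod c m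
  have h2 : 0 ≤ c % m := Int.emod_nonneg c (by omega)
  have h3 : c % m < m := Int.emod_lt_of_pos c hm
  split_ifs with h0
  · exact pvEdivEq _ _ _ hm (by nlinarith) (by nlinarith)
  · have h4 : 0 < c % m := lt_of_le_of_ne h2 (Ne.symm h0)
    exact pvEdivEq _ _ _ hm (by nlinarith) (by nlinarith)

theorem pvSumMult_step (c n2 m : Int) (hm : 0 < m) :
    pvSumMult c n2 m = (if c % m = 0 then c else 0) + pvSumMult (c + 1) n2 m := by
  unfold pvSumMult
  have h1 : c + 1 - 1 = c := by ring
  rw [h1, pvFloordiv_pred c m hm]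
  have h2 : PySem.Int.floordiv c m * m + c % m = c := by
    rw [PySem.Int.floordiv_eq_ediv_of_pos hm]; exact Int.ediv_mul_add_emod c m
  split_ifs with h0
  · rw [pvTri_step (PySem.Int.floordiv c m)]
    have : c = PySem.Int.floordiv c m * m := by omega
    ring_nf
    nlinarith [this]
  · ring

theorem pvF_step (c n2 : Int) :
    pvF c n2 =
      (if (c % 7 = 0 ∧ c % 5 = 0) ∨ (c % 3 = 0 ∧ c % 4 = 0) then c else 0) + pvF (c + 1) n2 := by
  unfold pvF
  rw [pvSumMult_step c n2 35 (by norm_num), pvSumMult_step c n2 12 (by norm_num),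
      pvSumMult_step c n2 420 (by norm_num)]
  split_ifs <;> omega

theorem pvF_empty (n2 : Int) : pvF (n2 + 1) n2 = 0 := by
  unfold pvF pvSumMult
  have h : n2 + 1 - 1 = n2 := by ring
  rw [h]; ring

theorem pvLoopA_eq (fuel : Nat) : ∀ (c s n2 : Int), c ≤ n2 + 1 → n2 - c + 1 ≤ (fuel : Int) →
    pvLoopA fuel c s n2 = s + pvF c n2 := by
  induction fuel with
  | zero =>
    intro c s n2 h1 h2
    have hc : c = n2 + 1 := by simp at h2; omega
    subst hc
    simp [pvLoopA, pvF_empty]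
  | succ f ih =>
    intro c s n2 h1 h2
    by_cases hle : c ≤ n2
    · rw [pvLoopA, if_pos hle, ih (c + 1) _ n2 (by omega) (by push_cast at h2 ⊢; omega),
          pvF_step c n2]
      split_ifs <;> ring
    · rw [pvLoopA, if_neg hle]
      have hc : c = n2 + 1 := by omega
      subst hc
      rw [pvF_empty]; ring

-- ===== VERDICT (by name: the statement is the Claim_ definition above) =====
theorem pregunta_2_spec : Claim_equal_pregunta_2 := by
  intro n1 n2 _
  unfold Spec_pregunta_2 pregunta_2 pregunta_2_alt
  by_cases h : n1 ≤ n2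
  · rw [pvLoopA_eq _ n1 0 n2 (by omega) (by omega),
        if_neg (by omega : ¬ n1 > n2), zero_add]
    rfl
  · have h0 : (n2 - n1 + 1).toNat = 0 := by omega
    rw [h0, if_pos (by omega : n1 > n2)]
    rfl
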